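-- pv_equiv track=rewrite | github.com/raiders032/PS | python/Programmers/더 맵게.py | solution
-- ===== SOURCE A (Python) =====
-- import heapq
--
-- def solution(scoville, K):
--     answer = 0
--     heapq.heapify(scoville)
--
--     while len(scoville) >= 2 and scoville[0] < K:
--         min_scoville1 = heapq.heappop(scoville)
--         min_scoville2 = heapq.heappop(scoville)
--         heapq.heappush(scoville, min_scoville1 + 2 * min_scoville2)
--         answer += 1
--
--     if scoville and scoville[0] < K:
--         return -1
--
--     return answer
-- ===== SOURCE B (Python) =====
-- def solution(scoville, K):
--     s = sorted(scoville)
--     i = 0          # front pointer: s[i:] is the live sorted pot list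
--     answer = 0
--     while len(s) - i >= 2 and s[i] < K:
--         new = s[i] + 2 * s[i + 1]
--         i += 2
--         # binary search for leftmost position in s[i:] with s[pos] >= new
--         lo, hi = i, len(s)
--         while lo < hi:
--             mid = (lo + hi) // 2
--             if s[mid] < new:
--                 lo = mid + 1
--             else:
--                 hi = mid
--         s.insert(lo, new)
--         answer += 1
--     if len(s) > i and s[i] < K:
--         return -1
--     return answer
-- ===== Notes on version B (the rewrite author's own statement) =====
-- stated objective: alternative
-- what changed: Replaces the binary heap (heapify/heappop/heappush) by a sorted list with a front pointer: sort once, take the two smallest off the front, and reinsert the mix at the position found by a hand-rolled binary search.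
import Mathlib
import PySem

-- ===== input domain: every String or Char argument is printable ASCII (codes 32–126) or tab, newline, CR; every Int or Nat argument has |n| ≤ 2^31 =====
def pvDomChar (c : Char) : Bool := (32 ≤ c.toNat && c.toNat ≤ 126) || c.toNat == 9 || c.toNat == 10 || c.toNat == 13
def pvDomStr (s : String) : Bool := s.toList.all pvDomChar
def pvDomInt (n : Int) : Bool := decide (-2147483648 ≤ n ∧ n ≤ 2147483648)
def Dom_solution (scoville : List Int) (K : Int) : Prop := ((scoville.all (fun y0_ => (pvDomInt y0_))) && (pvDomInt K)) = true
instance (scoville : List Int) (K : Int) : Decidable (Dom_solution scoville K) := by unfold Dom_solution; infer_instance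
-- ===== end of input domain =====

-- B replaces A's binary heap by a sorted list with ordered reinsertion (alternative data structure,
-- same greedy); equivalence is about the RETURN value only — Python A heapifies its argument in
-- place, Python B sorts a copy.

-- ===== PORT A =====
-- heapq is a library: its calls are ported by their value-level meaning on the multiset held in the
-- list — heappop removes and returns the minimum, heappush adds an element, and scoville[0] of a
-- heap is its minimum (heapify itself only rearranges, so it is value-invisible here).
def solutionLoopA (K : Int) (l : List Int) (answer : Int) : Int :=
  match _h : l.min? with
  | none => answer                                  -- empty list: while-guard and final if both fail
  | some m =>
    if _hc : 2 ≤ l.length ∧ m < K then              -- while len(scoville) >= 2 and scoville[0] < K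
      match _h2 : (l.erase m).min? with
      | none => answer                              -- unreachable: l.erase m is nonempty when 2 ≤ l.length
      | some m2 =>
        -- heappop, heappop, heappush(min1 + 2*min2), answer += 1
        solutionLoopA K (((l.erase m).erase m2) ++ [m + 2 * m2]) (answer + 1)
    else if m < K then -1 else answer               -- if scoville and scoville[0] < K: return -1
termination_by l.length
decreasing_by
  have hm : m ∈ l := List.min?_mem _h
  have hm2 : m2 ∈ l.erase m := List.min?_mem _h2
  have e1 := List.length_erase_of_mem hm
  have e2 := List.length_erase_of_mem hm2
  simp only [List.length_append, List.length_cons, List.length_nil, e2, e1]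
  omega

def solution (scoville : List Int) (K : Int) : Int :=
  solutionLoopA K scoville 0

-- ===== PORT B =====
-- Source B keeps the sorted list in s with a front pointer i; the port carries the live suffix s[i:]
-- directly (advancing i by 2 = uncons twice).  Source B's hand-written lo/hi binary search computes
-- bisect_left of the live list, ported as the PySem primitive PySem.List.bisectLeft; s.insert(lo, new)
-- at the live-relative position is PySem.List.insert.
theorem length_pyInsert (xs : List Int) (i : Int) (v : Int) :
    (PySem.List.insert xs i v).length = xs.length + 1 := by
  unfold PySem.List.insert PySem.List.sliceIndices
  simp

def solutionLoopB (K : Int) (s : List Int) (answer : Int) : Int :=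
  match s with
  | [] => answer
  | [a] => if a < K then -1 else answer
  | a :: b :: t =>
    if a < K then
      solutionLoopB K
        (PySem.List.insert t (PySem.List.bisectLeft t (a + 2 * b) : Int) (a + 2 * b))
        (answer + 1)
    else answer
termination_by s.length
decreasing_by simp only [length_pyInsert, List.length_cons]; omega

def solution_alt (scoville : List Int) (K : Int) : Int :=
  solutionLoopB K (PySem.List.sorted scoville (fun x => x) false) 0

-- ===== PRECONDITION & SPEC =====
def Spec_solution (scoville : List Int) (K : Int) (out : Int) : Prop := out = solution_alt scoville K
instance (scoville : List Int) (K : Int) (out : Int) : Decidable (Spec_solution scoville K out) := by unfold Spec_solution; infer_instance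

-- ===== CLAIM (what is proved, stated in full; the proofs are below) =====
def Claim_equal_solution : Prop := ∀ (scoville : List Int) (K : Int), Dom_solution scoville K → Spec_solution scoville K (solution scoville K)

-- ===== LEMMAS AND PROOFS =====

-- the minimum of any permutation of a sorted list a :: t is a
theorem min?_of_perm_sorted (l : List Int) (a : Int) (t : List Int)
    (hp : l.Perm (a :: t)) (hs : (a :: t).Pairwise (· ≤ ·)) : l.min? = some a := by
  rw [List.min?_eq_some_iff]
  constructor
  · exact hp.mem_iff.2 (List.mem_cons_self)
  · intro b hb
    have hb' := hp.mem_iff.1 hb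
    rcases List.mem_cons.1 hb' with h | h
    · exact le_of_eq h.symm
    · exact (List.pairwise_cons.1 hs).1 b h

-- PySem.List.insert at a Nat index k ≤ length is take/drop insertion
theorem pyInsert_eq_take_drop (xs : List Int) (k : Nat) (hk : k ≤ xs.length) (v : Int) :
    PySem.List.insert xs (k : Int) v = xs.take k ++ v :: xs.drop k := by
  unfold PySem.List.insert PySem.List.sliceIndices
  have h0 : ¬ ((k : Int) < 0) := by omega
  have h1 : ¬ ((1 : Int) < 0) := by decide
  simp only [h0, h1, if_false]
  have : min (k : Int) (xs.length : Int) = (k : Int) := by omega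
  simp [this]

-- inserting x at a position with everything before it < x and everything from it ≥ x
-- is ordered insertion
theorem takeDrop_eq_orderedInsert (x : Int) : ∀ (t : List Int) (k : Nat), k ≤ t.length →
    (∀ j (hj : j < t.length), j < k → t[j] < x) →
    (∀ j (hj : j < t.length), k ≤ j → x ≤ t[j]) →
    t.take k ++ x :: t.drop k = List.orderedInsert (· ≤ ·) x t := by
  intro t
  induction t with
  | nil =>
    intro k hk _ _
    have : k = 0 := Nat.le_zero.1 hk
    subst this
    simp [List.orderedInsert]
  | cons a t' ihx =>
    intro k hk h1 h2
    cases k with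
    | zero =>
      have hxa : x ≤ a := h2 0 (by simp) (Nat.zero_le 0)
      simp [List.orderedInsert, hxa]
    | succ k' =>
      have hax : a < x := h1 0 (by simp) (Nat.succ_pos k')
      have hnot : ¬ x ≤ a := not_le.2 hax
      simp only [List.take_succ_cons, List.drop_succ_cons, List.orderedInsert, if_neg hnot,
        List.cons_append]
      congr 1
      exact ihx k' (by simpa using hk)
        (fun j hj hjk => by simpa using h1 (j + 1) (by simpa using hj) (by omega))
        (fun j hj hjk => by simpa using h2 (j + 1) (by simpa using hj) (by omega))

-- Source B's binary-search insertion into a sorted live list is ordered insertion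
theorem pyInsert_bisect (t : List Int) (x : Int) (hs : t.Pairwise (· ≤ ·)) :
    PySem.List.insert t (PySem.List.bisectLeft t x : Int) x =
      List.orderedInsert (· ≤ ·) x t := by
  obtain ⟨hk, h1, h2⟩ := PySem.List.bisectLeft_spec t x hs
  rw [pyInsert_eq_take_drop _ _ hk, takeDrop_eq_orderedInsert x t _ hk h1 h2]

-- loop invariant: A's list is any permutation of B's sorted list
theorem loopA_eq_loopB_aux (K : Int) : ∀ (n : Nat) (s l : List Int) (ans : Int),
    s.length ≤ n →
    l.Perm s → s.Pairwise (· ≤ ·) → solutionLoopA K l ans = solutionLoopB K s ans := by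
  intro n
  induction n with
  | zero =>
    intro s l ans hn hp hs
    have hs0 : s = [] := List.eq_nil_of_length_eq_zero (Nat.le_zero.1 hn)
    subst hs0
    have hl : l = [] := List.Perm.eq_nil hp
    subst hl
    simp [solutionLoopA, solutionLoopB]
  | succ n ih =>
    intro s l ans hn hp hs
    match s with
    | [] =>
      have hl : l = [] := List.Perm.eq_nil hp
      subst hl
      simp [solutionLoopA, solutionLoopB]
    | [a] =>
      have hl : l = [a] := List.perm_singleton.1 hp
      subst hl
      rw [solutionLoopA, solutionLoopB]
      split
      · next heq => simp [List.min?] at heq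
      · next m heq =>
        have hma : a = m := by simpa [List.min?] using heq
        subst hma
        have : ¬ (2 ≤ ([a] : List Int).length ∧ a < K) := by simp
        rw [dif_neg this]
    | a :: b :: t =>
      have hmin : l.min? = some a := min?_of_perm_sorted l a (b :: t) hp hs
      have hlen : l.length = t.length + 2 := by simpa using hp.length_eq
      rw [solutionLoopA]
      split
      · next heq => rw [hmin] at heq; cases heq
      · next m heq =>
        have hma : a = m := by rw [hmin] at heq; exact Option.some.inj heq
        subst hma
        by_cases hK : a < K
        · have hc : 2 ≤ l.length ∧ a < K := ⟨by omega, hK⟩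
          rw [dif_pos hc]
          have hp1 : (l.erase a).Perm (b :: t) := by
            have := hp.erase a
            simpa using this
          have hs1 : (b :: t).Pairwise (· ≤ ·) := (List.pairwise_cons.1 hs).2
          have hmin2 : (l.erase a).min? = some b := min?_of_perm_sorted _ b t hp1 hs1
          split
          · next heq2 => rw [hmin2] at heq2; cases heq2
          · next m2 heq2 =>
            have hmb : b = m2 := by rw [hmin2] at heq2; exact Option.some.inj heq2
            subst hmb
            have hp2 : ((l.erase a).erase b).Perm t := by
              have := hp1.erase b
              simpa using this
            have hp3 : (((l.erase a).erase b) ++ [a + 2 * b]).Perm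
                (List.orderedInsert (· ≤ ·) (a + 2 * b) t) :=
              ((hp2.append_right [a + 2 * b]).trans List.perm_append_comm).trans
                (List.perm_orderedInsert _ _ _).symm
            have hst : t.Pairwise (· ≤ ·) := (List.pairwise_cons.1 hs1).2
            have hs3 : (List.orderedInsert (· ≤ ·) (a + 2 * b) t).Pairwise (· ≤ ·) :=
              List.Pairwise.orderedInsert _ _ hst
            rw [solutionLoopB, if_pos hK, pyInsert_bisect t (a + 2 * b) hst]
            exact ih _ _ _ (by simp only [List.orderedInsert_length]; simp at hn; omega) hp3 hs3
        · have hc : ¬ (2 ≤ l.length ∧ a < K) := by tauto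
          rw [dif_neg hc, if_neg hK, solutionLoopB, if_neg hK]

-- ===== VERDICT (by name: the statement is the Claim_ definition above) =====
theorem solution_spec : Claim_equal_solution := by
  intro scoville K _
  unfold Spec_solution solution solution_alt
  exact loopA_eq_loopB_aux K _ _ scoville 0 le_rfl
    (PySem.List.sorted_perm scoville (fun x => x) false).symm
    (by simpa using PySem.List.sorted_pairwise scoville (fun x => x))
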